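-- pv_equiv track=rewrite | github.com/nfitzen/advent-of-code-2021 | day4/star2.py | play_bingo
-- ===== SOURCE A (Python) =====
-- from typing import Iterable, Optional, Union
--
-- Board = list[list[int]]
--
-- def play_bingo(board: Board, numbers: Iterable[int]) -> tuple[int, int, Board]:
--     """Returns the number required to win Bingo."""
--
--     current_board = board.copy() # type: ignore
--
--     for index, num in enumerate(numbers):
--         # Mark number on board
--         for i, row in enumerate(board):
--             for j, entry in enumerate(row):
--                 if entry == num:
--                     current_board[i][j] = None # type: ignore
--                     break
--
--         # Check if a row or column is 5 in a row
--         for units in (current_board, zip(*current_board)):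
--             for row in units:
--                 if all(e is None for e in row):
--                     return (index, num, current_board)
--
--     raise Exception("wtf")
-- ===== SOURCE B (Python) =====
-- # B: same per-number first-match marking, but win detection via maintained
-- # remaining-unmarked counters per row and per (zip-truncated) column instead of
-- # rescanning every row and rebuilding zip(*board) each turn.
-- # Like A, mutates the input board's inner rows in place (shallow copy).
-- def play_bingo(board, numbers):
--     current_board = board.copy()
--     row_left = [len(r) for r in board]
--     ncols = min((len(r) for r in board), default=0)
--     col_left = [len(board)] * ncols
--     for index, num in enumerate(numbers):
--         for i, row in enumerate(current_board):
--             for j, entry in enumerate(row):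
--                 if entry == num:
--                     row[j] = None
--                     row_left[i] -= 1
--                     if j < ncols:
--                         col_left[j] -= 1
--                     break
--         if 0 in row_left or 0 in col_left:
--             return (index, num, current_board)
--     raise Exception("wtf")
-- ===== Notes on version B (the rewrite author's own statement) =====
-- stated objective: alternative
-- what changed: Keeps the per-number first-match-per-row marking but replaces the full rescan of every row plus rebuilding zip(*board) each turn by maintained remaining-unmarked counters per row and per column, decremented as cells are nulled and checked for zero.
import Mathlib
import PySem

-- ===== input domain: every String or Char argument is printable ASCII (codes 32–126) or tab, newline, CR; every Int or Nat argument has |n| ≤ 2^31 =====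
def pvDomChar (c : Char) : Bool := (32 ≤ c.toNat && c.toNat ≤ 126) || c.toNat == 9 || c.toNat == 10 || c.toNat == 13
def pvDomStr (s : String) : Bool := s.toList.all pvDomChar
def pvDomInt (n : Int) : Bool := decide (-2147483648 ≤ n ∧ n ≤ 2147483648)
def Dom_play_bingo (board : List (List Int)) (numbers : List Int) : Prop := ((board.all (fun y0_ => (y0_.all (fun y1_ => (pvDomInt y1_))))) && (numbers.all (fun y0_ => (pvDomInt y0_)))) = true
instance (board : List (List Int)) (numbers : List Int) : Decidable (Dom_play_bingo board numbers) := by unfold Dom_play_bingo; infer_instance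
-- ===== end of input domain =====

-- B keeps A's first-match-per-row marking but detects a finished line with maintained
-- per-row/per-column remaining-unmarked counters instead of rescanning rows and zip(*board)
-- each turn (alternative decomposition; equivalence is about the RETURN value — both Pythons
-- mutate the input board's inner rows in place identically).


-- ===== PORT A =====
-- A's inner per-row loop: null the FIRST cell equal to num, then break.
def markRowA (num : Int) : List (Option Int) → List (Option Int)
  | [] => []
  | e :: rest => if e = some num then none :: rest else e :: markRowA num rest

-- `all(e is None for e in row)`
def allNoneRow (row : List (Option Int)) : Bool := row.all (fun e => e.isNone)

-- the builtin zip(*current_board): columns j < min row length (empty for an empty board)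
def pyZipStar (b : List (List (Option Int))) : List (List (Option Int)) :=
  (List.range ((b.map List.length).min?.getD 0)).map (fun j => b.map (fun r => r.getD j none))

-- `for units in (current_board, zip(*current_board)): for row in units: if all(...)`
def checkA (b : List (List (Option Int))) : Bool :=
  b.any allNoneRow || (pyZipStar b).any allNoneRow

-- `for index, num in enumerate(numbers)` loop; the final `raise Exception("wtf")`
-- has no value, those inputs are excluded by Pre_ below (junk value (-1,-1,[])).
def playA : Int → List (List (Option Int)) → List Int → Int × Int × List (List (Option Int))
  | _, _, [] => (-1, -1, [])
  | idx, b, n :: ns =>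
    let b' := b.map (markRowA n)
    if checkA b' then (idx, n, b') else playA (idx + 1) b' ns

def play_bingo (board : List (List Int)) (numbers : List Int) : Int × Int × List (List (Option Int)) :=
  playA 0 (board.map (fun r => r.map some)) numbers

-- ===== PORT B =====
-- B's per-row marking: also report the column index j of the nulled cell (none = no match).
def markRowB (num : Int) : List (Option Int) → Option (Nat × List (Option Int))
  | [] => none
  | e :: rest =>
    if e = some num then some (0, none :: rest)
    else
      match markRowB num rest with
      | some (j, rest') => some (j + 1, e :: rest')
      | none => none

-- one number: walk rows in lockstep with row_left, decrement counters where a cell is nulled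
-- (`if j < ncols: col_left[j] -= 1` = out-of-range modify is a no-op, cc has length ncols)
def stepB (num : Int) : List (List (Option Int)) → List Nat → List Nat →
    List (List (Option Int)) × List Nat × List Nat
  | [], _, cc => ([], [], cc)
  | r :: rs, rc, cc =>
    match markRowB num r with
    | some (j, r') =>
      let out := stepB num rs rc.tail (cc.modify j (· - 1))
      (r' :: out.1, (rc.headD 0 - 1) :: out.2.1, out.2.2)
    | none =>
      let out := stepB num rs rc.tail cc
      (r :: out.1, rc.headD 0 :: out.2.1, out.2.2)

def playB : Int → List (List (Option Int)) → List Nat → List Nat → List Int →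
    Int × Int × List (List (Option Int))
  | _, _, _, _, [] => (-1, -1, [])
  | idx, b, rc, cc, n :: ns =>
    let s := stepB n b rc cc
    if s.2.1.contains 0 || s.2.2.contains 0 then (idx, n, s.1)
    else playB (idx + 1) s.1 s.2.1 s.2.2 ns

def play_bingo_alt (board : List (List Int)) (numbers : List Int) : Int × Int × List (List (Option Int)) :=
  playB 0 (board.map (fun r => r.map some)) (board.map List.length)
    (List.replicate ((board.map List.length).min?.getD 0) board.length) numbers

-- ===== PRECONDITION & SPEC =====
-- Pre_ admits EXACTLY the inputs on which A returns; on the rest A raises Exception("wtf")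
-- (numbers exhausted with no completed line), and B raises identically there. Closed form:
-- marking nulls, per occurrence of a value v in numbers, the leftmost unmarked v-cell of each
-- row, so a row eventually completes iff each of its values occurs at least as often in
-- numbers, and column j completes iff for every row the cell r[j] is reached, i.e. the count
-- of r[j] in r up to position j is at most its count in numbers.
def Pre_play_bingo (board : List (List Int)) (numbers : List Int) : Prop :=
  numbers ≠ [] ∧
    ((∃ r ∈ board, ∀ v ∈ r, r.count v ≤ numbers.count v) ∨
      (board ≠ [] ∧ ∃ j ∈ List.range ((board.map List.length).min?.getD 0),
        ∀ r ∈ board, (r.take (j + 1)).count (r.getD j 0) ≤ numbers.count (r.getD j 0)))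
instance (board : List (List Int)) (numbers : List Int) : Decidable (Pre_play_bingo board numbers) := by
  unfold Pre_play_bingo; infer_instance

def pvWitness_play_bingo : List (List Int) × List Int := ([[1, 2], [3, 4]], [1, 2])

def Spec_play_bingo (board : List (List Int)) (numbers : List Int) (out : Int × Int × List (List (Option Int))) : Prop := out = play_bingo_alt board numbers
instance (board : List (List Int)) (numbers : List Int) (out : Int × Int × List (List (Option Int))) : Decidable (Spec_play_bingo board numbers out) := by unfold Spec_play_bingo; infer_instance

-- ===== CLAIM (what is proved, stated in full; the proofs are below) =====
def Claim_equal_play_bingo : Prop := ∀ (board : List (List Int)) (numbers : List Int), Dom_play_bingo board numbers → Pre_play_bingo board numbers → Spec_play_bingo board numbers (play_bingo board numbers)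

-- ===== LEMMAS AND PROOFS =====

-- counters as functions of the current marked board
def rcOf (b : List (List (Option Int))) : List Nat :=
  b.map (fun r => r.countP (fun e => e.isSome))

def colcnt (j : Nat) (b : List (List (Option Int))) : Nat :=
  b.countP (fun r => (r.getD j none).isSome)

def ccOf (n : Nat) (b : List (List (Option Int))) : List Nat :=
  (List.range n).map (fun j => colcnt j b)

def hits (num : Int) (j : Nat) (b : List (List (Option Int))) : Nat :=
  b.countP (fun r => (markRowB num r).map Prod.fst == some j)

def decs (num : Int) (cc : List Nat) (b : List (List (Option Int))) : List Nat :=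
  b.foldl (fun acc r =>
    match markRowB num r with
    | some (j, _) => acc.modify j (· - 1)
    | none => acc) cc

theorem mark_none (num : Int) (r : List (Option Int)) (h : markRowB num r = none) :
    markRowA num r = r := by
  induction r with
  | nil => rfl
  | cons e rest ih =>
    by_cases he : e = some num
    · simp [markRowB, he] at h
    · simp only [markRowB, he, if_false] at h
      cases hm : markRowB num rest with
      | some p => rw [hm] at h; simp at h
      | none => simp [markRowA, he, ih hm]

theorem mark_some_board (num : Int) (r r' : List (Option Int)) (j : Nat)
    (h : markRowB num r = some (j, r')) : markRowA num r = r' := by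
  induction r generalizing j r' with
  | nil => simp [markRowB] at h
  | cons e rest ih =>
    by_cases he : e = some num
    · simp only [markRowB, he, if_true, Option.some.injEq, Prod.mk.injEq] at h
      simp [markRowA, he, ← h.2]
    · simp only [markRowB, he, if_false] at h
      cases hm : markRowB num rest with
      | none => rw [hm] at h; simp at h
      | some p =>
        rw [hm] at h
        obtain ⟨k, rest'⟩ := p
        simp only [Option.some.injEq, Prod.mk.injEq] at h
        simp [markRowA, he, ← h.2, ih rest' k hm]

theorem mark_some_cnt (num : Int) (r r' : List (Option Int)) (j : Nat)
    (h : markRowB num r = some (j, r')) :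
    r'.countP (fun e => e.isSome) + 1 = r.countP (fun e => e.isSome) := by
  induction r generalizing j r' with
  | nil => simp [markRowB] at h
  | cons e rest ih =>
    by_cases he : e = some num
    · simp only [markRowB, he, if_true, Option.some.injEq, Prod.mk.injEq] at h
      subst he
      simp [← h.2]
    · simp only [markRowB, he, if_false] at h
      cases hm : markRowB num rest with
      | none => rw [hm] at h; simp at h
      | some p =>
        rw [hm] at h
        obtain ⟨k, rest'⟩ := p
        simp only [Option.some.injEq, Prod.mk.injEq] at h
        have := ih rest' k hm
        simp only [← h.2, List.countP_cons]
        omega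

theorem mark_some_getD (num : Int) (r r' : List (Option Int)) (j : Nat)
    (h : markRowB num r = some (j, r')) (j' : Nat) :
    r'.getD j' none = if j' = j then none else r.getD j' none := by
  induction r generalizing j r' j' with
  | nil => simp [markRowB] at h
  | cons e rest ih =>
    by_cases he : e = some num
    · simp only [markRowB, he, if_true, Option.some.injEq, Prod.mk.injEq] at h
      cases j' with
      | zero => simp [← h.1, ← h.2]
      | succ m => simp [← h.1, ← h.2]
    · simp only [markRowB, he, if_false] at h
      cases hm : markRowB num rest with
      | none => rw [hm] at h; simp at h
      | some p =>
        rw [hm] at h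
        obtain ⟨k, rest'⟩ := p
        simp only [Option.some.injEq, Prod.mk.injEq] at h
        cases j' with
        | zero => simp [← h.1, ← h.2]
        | succ m =>
          have hrec := ih rest' k hm m
          rw [← h.1, ← h.2]
          simp only [List.getD_cons_succ, hrec]
          by_cases hmk : m = k <;> simp [hmk]

theorem mark_some_at (num : Int) (r r' : List (Option Int)) (j : Nat)
    (h : markRowB num r = some (j, r')) : r.getD j none = some num := by
  induction r generalizing j r' with
  | nil => simp [markRowB] at h
  | cons e rest ih =>
    by_cases he : e = some num
    · simp only [markRowB, he, if_true, Option.some.injEq, Prod.mk.injEq] at h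
      simp [← h.1, he]
    · simp only [markRowB, he, if_false] at h
      cases hm : markRowB num rest with
      | none => rw [hm] at h; simp at h
      | some p =>
        rw [hm] at h
        obtain ⟨k, rest'⟩ := p
        simp only [Option.some.injEq, Prod.mk.injEq] at h
        rw [← h.1]
        simpa [List.getD_cons_succ] using ih rest' k hm

theorem mark_len (num : Int) (r : List (Option Int)) :
    (markRowA num r).length = r.length := by
  induction r with
  | nil => rfl
  | cons e rest ih =>
    by_cases he : e = some num <;> simp [markRowA, he, ih]

theorem hit_none (num : Int) (r : List (Option Int)) (j : Nat)
    (hm : markRowB num r = none) :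
    ((markRowB num r).map Prod.fst == some j) = false := by
  rw [hm]; rfl

theorem hit_some (num : Int) (r r' : List (Option Int)) (k j : Nat)
    (hm : markRowB num r = some (k, r')) :
    ((markRowB num r).map Prod.fst == some j) = (k == j) := by
  rw [hm]; rfl

theorem colcnt_cons (j : Nat) (r : List (Option Int)) (rs : List (List (Option Int))) :
    colcnt j (r :: rs) = colcnt j rs + (if ((r.getD j none).isSome) then 1 else 0) := by
  simp [colcnt, List.countP_cons]

theorem hits_cons (num : Int) (j : Nat) (r : List (Option Int)) (rs : List (List (Option Int))) :
    hits num j (r :: rs) =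
      hits num j rs + (if ((markRowB num r).map Prod.fst == some j) then 1 else 0) := by
  simp [hits, List.countP_cons]

theorem colcnt_step (num : Int) (j : Nat) (b : List (List (Option Int))) :
    colcnt j (b.map (markRowA num)) + hits num j b = colcnt j b := by
  induction b with
  | nil => rfl
  | cons r rs ih =>
    rw [List.map_cons, colcnt_cons, colcnt_cons, hits_cons]
    cases hm : markRowB num r with
    | none =>
      rw [mark_none num r hm]
      have hb : ((Option.map Prod.fst (none : Option (Nat × List (Option Int)))) == some j) = false := rfl
      rw [hb]
      simp only [Bool.false_eq_true, if_false]
      omega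
    | some p =>
      obtain ⟨k, r'⟩ := p
      have hb : ((Option.map Prod.fst (some (k, r'))) == some j) = (k == j) := rfl
      rw [mark_some_board num r r' k hm, hb, mark_some_getD num r r' k hm j]
      have ha := mark_some_at num r r' k hm
      by_cases hjk : j = k
      · subst hjk
        rw [ha]
        simp only [beq_self_eq_true, if_true]
        simp only [Option.isSome_none, Bool.false_eq_true, if_false,
          Option.isSome_some, if_true]
        omega
      · have hne : (k == j) = false := beq_eq_false_iff_ne.mpr (fun hc => hjk hc.symm)
        rw [if_neg hjk, hne]
        simp only [Bool.false_eq_true, if_false]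
        omega

theorem decs_nil (num : Int) (cc : List Nat) : decs num cc [] = cc := rfl

theorem decs_cons_none (num : Int) (cc : List Nat) (r : List (Option Int))
    (rs : List (List (Option Int))) (hm : markRowB num r = none) :
    decs num cc (r :: rs) = decs num cc rs := by
  simp only [decs, List.foldl_cons, hm]

theorem decs_cons_some (num : Int) (cc : List Nat) (r r' : List (Option Int)) (k : Nat)
    (rs : List (List (Option Int))) (hm : markRowB num r = some (k, r')) :
    decs num cc (r :: rs) = decs num (cc.modify k (· - 1)) rs := by
  simp only [decs, List.foldl_cons, hm]

theorem decs_len (num : Int) (b : List (List (Option Int))) (cc : List Nat) :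
    (decs num cc b).length = cc.length := by
  induction b generalizing cc with
  | nil => rfl
  | cons r rs ih =>
    cases hm : markRowB num r with
    | none => rw [decs_cons_none num cc r rs hm]; exact ih cc
    | some p =>
      obtain ⟨k, r'⟩ := p
      rw [decs_cons_some num cc r r' k rs hm, ih (cc.modify k (· - 1))]
      simp

theorem getD_modify_one (cc : List Nat) (k j : Nat) :
    (cc.modify k (· - 1)).getD j 0 = if k = j then cc.getD j 0 - 1 else cc.getD j 0 := by
  induction cc generalizing k j with
  | nil =>
    simp only [List.modify_nil, List.getD_nil]
    split <;> rfl
  | cons x xs ih =>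
    cases k with
    | zero =>
      cases j with
      | zero => simp [List.modify_zero_cons]
      | succ m => simp [List.modify_zero_cons]
    | succ kk =>
      cases j with
      | zero => simp [List.modify_succ_cons]
      | succ m =>
        simp only [List.modify_succ_cons, List.getD_cons_succ, ih kk m]
        by_cases h : kk = m <;> simp [h]

theorem decs_getD (num : Int) (b : List (List (Option Int))) (cc : List Nat) (j : Nat) :
    (decs num cc b).getD j 0 = cc.getD j 0 - hits num j b := by
  induction b generalizing cc with
  | nil => simp [decs_nil, hits]
  | cons r rs ih =>
    cases hm : markRowB num r with
    | none =>
      rw [decs_cons_none num cc r rs hm, ih cc, hits_cons, hit_none num r j hm]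
      simp
    | some p =>
      obtain ⟨k, r'⟩ := p
      rw [decs_cons_some num cc r r' k rs hm, ih (cc.modify k (· - 1)),
        getD_modify_one, hits_cons, hit_some num r r' k j hm]
      by_cases hkj : k = j
      · subst hkj
        simp only [beq_self_eq_true, if_true]
        omega
      · have hne : (k == j) = false := beq_eq_false_iff_ne.mpr hkj
        rw [if_neg hkj, hne]
        simp

theorem ccOf_mark (num : Int) (n : Nat) (b : List (List (Option Int))) :
    ccOf n (b.map (markRowA num)) = decs num (ccOf n b) b := by
  have hlen : (ccOf n b).length = n := by simp [ccOf]
  apply List.ext_getElem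
  · simp [ccOf, decs_len]
  · intro j h1 h2
    have hj : j < n := by simpa [ccOf] using h1
    have h3 : j < (decs num (ccOf n b) b).length := h2
    rw [← List.getD_eq_getElem (decs num (ccOf n b) b) 0 h3, decs_getD]
    have h4 : j < (ccOf n b).length := by rw [hlen]; exact hj
    have lhs : (ccOf n (b.map (markRowA num)))[j]'h1 = colcnt j (b.map (markRowA num)) := by
      simp [ccOf]
    have rhs : (ccOf n b).getD j 0 = colcnt j b := by
      rw [List.getD_eq_getElem (ccOf n b) 0 h4]
      simp [ccOf]
    rw [lhs, rhs]
    have := colcnt_step num j b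
    omega

theorem stepB_eq (num : Int) (b : List (List (Option Int))) (cc : List Nat) :
    stepB num b (rcOf b) cc =
      (b.map (markRowA num), rcOf (b.map (markRowA num)), decs num cc b) := by
  induction b generalizing cc with
  | nil => simp [stepB, rcOf, decs_nil]
  | cons r rs ih =>
    have htail : (rcOf (r :: rs)).tail = rcOf rs := rfl
    have hhead : (rcOf (r :: rs)).headD 0 = r.countP (fun e => e.isSome) := rfl
    cases hm : markRowB num r with
    | none =>
      rw [List.map_cons, mark_none num r hm, decs_cons_none num cc r rs hm]
      simp only [stepB, hm, htail, hhead, ih cc]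
      exact rfl
    | some p =>
      obtain ⟨k, r'⟩ := p
      rw [List.map_cons, mark_some_board num r r' k hm, decs_cons_some num cc r r' k rs hm]
      simp only [stepB, hm, htail, hhead, ih (cc.modify k (· - 1))]
      have hcnt := mark_some_cnt num r r' k hm
      have hc : r.countP (fun e => e.isSome) - 1 = r'.countP (fun e => e.isSome) := by omega
      rw [hc]
      exact rfl

theorem lens_mark (num : Int) (b : List (List (Option Int))) :
    (b.map (markRowA num)).map List.length = b.map List.length := by
  simp [List.map_map, Function.comp_def, mark_len]

theorem check_eq (b : List (List (Option Int))) :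
    checkA b = ((rcOf b).contains 0 ||
      (ccOf ((b.map List.length).min?.getD 0) b).contains 0) := by
  rw [Bool.eq_iff_iff]
  simp only [checkA, Bool.or_eq_true, List.any_eq_true, pyZipStar, List.mem_map,
    List.mem_range, rcOf, ccOf, List.contains_eq_mem, decide_eq_true_eq, colcnt]
  constructor
  · rintro (⟨r, hr, ha⟩ | ⟨col, ⟨j, hj, rfl⟩, ha⟩)
    · left
      refine ⟨r, hr, ?_⟩
      rw [List.countP_eq_zero]
      intro e he
      have := List.all_eq_true.mp ha e he
      simp_all [allNoneRow]
    · right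
      refine ⟨j, hj, ?_⟩
      rw [List.countP_eq_zero]
      intro r hr
      have := List.all_eq_true.mp ha _ (List.mem_map_of_mem hr)
      simp_all [allNoneRow]
  · rintro (⟨r, hr, hc⟩ | ⟨j, hj, hc⟩)
    · left
      refine ⟨r, hr, ?_⟩
      rw [List.countP_eq_zero] at hc
      simp only [allNoneRow, List.all_eq_true]
      intro e he
      have := hc e he
      simp_all
    · right
      refine ⟨_, ⟨j, hj, rfl⟩, ?_⟩
      rw [List.countP_eq_zero] at hc
      simp only [allNoneRow, List.all_eq_true]
      intro e he
      obtain ⟨r, hr, rfl⟩ := List.mem_map.mp he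
      have := hc r hr
      simp_all

theorem main_eq (ns : List Int) (idx : Int) (b : List (List (Option Int))) :
    playA idx b ns = playB idx b (rcOf b) (ccOf ((b.map List.length).min?.getD 0) b) ns := by
  induction ns generalizing idx b with
  | nil => rfl
  | cons n ns ih =>
    simp only [playA, playB, stepB_eq]
    rw [← ccOf_mark]
    rw [check_eq (b.map (markRowA n)), lens_mark]
    split
    · rfl
    · rw [ih (idx + 1) (b.map (markRowA n)), lens_mark]

theorem foldl_min_le_init (xs : List Nat) (x : Nat) : xs.foldl min x ≤ x := by
  induction xs generalizing x with
  | nil => exact le_refl x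
  | cons y ys ih =>
    exact le_trans (ih (min x y)) (min_le_left x y)

theorem foldl_min_le_mem (xs : List Nat) (x a : Nat) (h : a ∈ xs) : xs.foldl min x ≤ a := by
  induction xs generalizing x with
  | nil => simp at h
  | cons y ys ih =>
    rcases List.mem_cons.mp h with rfl | h'
    · exact le_trans (foldl_min_le_init ys (min x a)) (min_le_right x a)
    · exact ih (min x y) h'

theorem min?getD_le (l : List Nat) (a : Nat) (h : a ∈ l) : l.min?.getD 0 ≤ a := by
  cases l with
  | nil => simp at h
  | cons x xs =>
    rcases List.mem_cons.mp h with rfl | h'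
    · simpa [List.min?] using foldl_min_le_init xs a
    · simpa [List.min?] using foldl_min_le_mem xs x a h'

theorem init_cc (board : List (List Int)) :
    List.replicate ((board.map List.length).min?.getD 0) board.length =
      ccOf (((board.map (fun r => r.map some)).map List.length).min?.getD 0)
        (board.map (fun r => r.map some)) := by
  have hml : (board.map (fun r => r.map some)).map List.length = board.map List.length := by
    simp [List.map_map, Function.comp_def]
  rw [hml]
  apply List.ext_getElem
  · simp [ccOf]
  · intro j h1 h2
    have hj : j < (board.map List.length).min?.getD 0 := by simpa using h1
    simp only [List.getElem_replicate, ccOf, List.getElem_map, List.getElem_range, colcnt]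
    rw [List.countP_map]
    refine (List.countP_eq_length.mpr ?_).symm
    intro r hr
    have hle : (board.map List.length).min?.getD 0 ≤ r.length :=
      min?getD_le _ _ (List.mem_map_of_mem hr)
    have hjr : j < (r.map some).length := by simpa using lt_of_lt_of_le hj hle
    rw [Function.comp_apply, List.getD_eq_getElem _ _ hjr]
    simp

theorem init_rc (board : List (List Int)) :
    board.map List.length = rcOf (board.map (fun r => r.map some)) := by
  simp only [rcOf, List.map_map, Function.comp_def, List.countP_map]
  congr 1
  funext r
  exact (List.countP_eq_length.mpr (fun a _ => rfl)).symm

-- ===== VERDICT (by name: the statement is the Claim_ definition above) =====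
theorem play_bingo_spec : Claim_equal_play_bingo := by
  intro board numbers _ _
  unfold Spec_play_bingo play_bingo play_bingo_alt
  rw [main_eq, init_cc, init_rc]
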